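-- pv_equiv track=rewrite | github.com/Joshua992700/ESEC-Portal | precompute_squares_and_cubes.py | count_perfect_pairs
-- ===== SOURCE A (Python) =====
-- def count_perfect_pairs(array, squares_and_cubes):
--     count = 0
--     n = len(array)
--     for i in range(n):
--         for j in range(i + 1, n):
--             if (array[i] + array[j]) in squares_and_cubes:
--                 count += 1
--     return count
-- ===== SOURCE B (Python) =====
-- def count_perfect_pairs(array, squares_and_cubes):
--     targets = set(squares_and_cubes)
--     seen = {}
--     count = 0
--     for x in array:
--         for t in targets:
--             count += seen.get(t - x, 0)
--         seen[x] = seen.get(x, 0) + 1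
--     return count
-- ===== Notes on version B (the rewrite author's own statement) =====
-- stated objective: alternative
-- what changed: Replaces the all-pairs double loop with membership scan by a single pass that keeps a frequency dict of elements seen so far and, for each element, sums the counts of complements t - x over the distinct targets.
import Mathlib
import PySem

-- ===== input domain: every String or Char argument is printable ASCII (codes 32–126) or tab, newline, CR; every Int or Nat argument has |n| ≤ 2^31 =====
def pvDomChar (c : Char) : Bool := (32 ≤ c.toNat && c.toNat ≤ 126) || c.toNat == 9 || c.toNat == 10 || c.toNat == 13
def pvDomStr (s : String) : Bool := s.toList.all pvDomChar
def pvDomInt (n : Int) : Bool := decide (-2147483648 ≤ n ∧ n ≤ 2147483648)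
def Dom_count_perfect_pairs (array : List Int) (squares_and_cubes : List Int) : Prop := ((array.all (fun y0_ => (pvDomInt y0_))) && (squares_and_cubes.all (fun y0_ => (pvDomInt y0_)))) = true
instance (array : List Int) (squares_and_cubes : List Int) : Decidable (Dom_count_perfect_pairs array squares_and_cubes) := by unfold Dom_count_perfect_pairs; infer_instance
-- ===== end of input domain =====

-- B replaces A's all-pairs double loop by one pass with a frequency dict of the elements seen
-- so far, adding for each element the seen-counts of its complements over the distinct targets (alternative algorithm).

-- ===== PORT A =====
def count_perfect_pairs (array : List Int) (squares_and_cubes : List Int) : Int :=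
  let n : Int := (array.length : Int)
  (PySem.List.pyRange 0 n 1).foldl (fun count i =>
    (PySem.List.pyRange (i + 1) n 1).foldl (fun count j =>
      if (PySem.List.pyGetD array i 0 + PySem.List.pyGetD array j 0) ∈ squares_and_cubes then count + 1 else count)
      count) 0

-- ===== PORT B =====
def count_perfect_pairs_alt (array : List Int) (squares_and_cubes : List Int) : Int :=
  let targets : PySem.Set Int := PySem.Set.ofList squares_and_cubes
  (array.foldl (fun (st : PySem.Dict Int Int × Int) x =>
      (st.1.insert x (st.1.getD x 0 + 1),
       targets.foldl (fun c t => c + st.1.getD (t - x) 0) st.2))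
    (PySem.Dict.empty, 0)).2

-- ===== PRECONDITION & SPEC =====
def Spec_count_perfect_pairs (array : List Int) (squares_and_cubes : List Int) (out : Int) : Prop := out = count_perfect_pairs_alt array squares_and_cubes
instance (array : List Int) (squares_and_cubes : List Int) (out : Int) : Decidable (Spec_count_perfect_pairs array squares_and_cubes out) := by unfold Spec_count_perfect_pairs; infer_instance

-- ===== CLAIM (what is proved, stated in full; the proofs are below) =====
def Claim_equal_count_perfect_pairs : Prop := ∀ (array : List Int) (squares_and_cubes : List Int), Dom_count_perfect_pairs array squares_and_cubes → Spec_count_perfect_pairs array squares_and_cubes (count_perfect_pairs array squares_and_cubes)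

-- ===== LEMMAS AND PROOFS =====

-- reference count: A's value written structurally (each element paired with the later ones)
def pvSpec (S : List Int) : List Int → Int
  | [] => 0
  | x :: l => (l.countP (fun y => decide (x + y ∈ S)) : Int) + pvSpec S l

-- cross pairs between an earlier prefix p and a later list l
def pvCross (S : List Int) (p l : List Int) : Int :=
  (l.map (fun z => ((p.countP (fun y => decide (y + z ∈ S))) : Int))).sum

-- the 0/1 indicator summed over the deduplicated targets is plain membership in S
theorem pv_ind_sum (S : List Int) (x y : Int) :
    ((PySem.Set.ofList S).map (fun t => if (y = t - x) then (1:Int) else 0)).sum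
      = (if (y + x) ∈ S then 1 else 0) := by
  have hconv : ∀ t : Int, (y = t - x) ↔ (t = y + x) := by intro t; omega
  simp only [hconv]
  have h0 := PySem.List.sum_map_ite_one_zero (fun t => t == (y + x)) (PySem.Set.ofList S)
  simp only [beq_iff_eq] at h0
  rw [h0, ← List.count_eq_countP]
  have hn : (PySem.Set.ofList S).Nodup := PySem.Set.nodup_ofList S
  by_cases h : (y + x) ∈ S
  · rw [List.count_eq_one_of_mem hn ((PySem.Set.mem_ofList S _).mpr h), if_pos h]; rfl
  · rw [List.count_eq_zero_of_not_mem (fun hc => h ((PySem.Set.mem_ofList S _).mp hc)), if_neg h]; rfl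

-- B's inner loop: summing the counter of p over the distinct targets counts the y in p with y + x in S
theorem pv_sum_targets (S : List Int) (p : List Int) (x : Int) :
    ((PySem.Set.ofList S).map (fun t => ((PySem.Dict.counter p).getD (t - x) 0))).sum
      = (p.countP (fun y => decide (y + x ∈ S)) : Int) := by
  induction p with
  | nil => simp [PySem.Dict.getD_counter]
  | cons y p ih =>
    have h1 : ∀ t : Int, ((PySem.Dict.counter (y :: p)).getD (t - x) 0)
        = (if (y = t - x) then (1:Int) else 0) + ((PySem.Dict.counter p).getD (t - x) 0) := by
      intro t
      rw [PySem.Dict.getD_counter, PySem.Dict.getD_counter, List.count_cons]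
      by_cases h : y = t - x <;> simp [h] <;> push_cast <;> ring
    calc ((PySem.Set.ofList S).map (fun t => ((PySem.Dict.counter (y::p)).getD (t - x) 0))).sum
        = ((PySem.Set.ofList S).map (fun t => (if (y = t - x) then (1:Int) else 0) + ((PySem.Dict.counter p).getD (t - x) 0))).sum := by
          simp only [h1]
      _ = ((PySem.Set.ofList S).map (fun t => if (y = t - x) then (1:Int) else 0)).sum
          + ((PySem.Set.ofList S).map (fun t => ((PySem.Dict.counter p).getD (t - x) 0))).sum := by
          rw [PySem.List.sum_map_add_int]
      _ = (if (y + x) ∈ S then 1 else 0) + (p.countP (fun y => decide (y + x ∈ S)) : Int) := by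
          rw [pv_ind_sum, ih]
      _ = ((y :: p).countP (fun y => decide (y + x ∈ S)) : Int) := by
          rw [List.countP_cons]
          by_cases h : (y + x) ∈ S <;> simp [h] <;> ring

theorem pv_cross_append (S p l : List Int) (z : Int) :
    pvCross S (p ++ [z]) l = pvCross S p l + (l.countP (fun w => decide (z + w ∈ S)) : Int) := by
  unfold pvCross
  have h : ∀ w : Int, (((p ++ [z]).countP (fun y => decide (y + w ∈ S))) : Int)
      = (p.countP (fun y => decide (y + w ∈ S)) : Int) + (if (z + w) ∈ S then (1:Int) else 0) := by
    intro w
    rw [List.countP_append]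
    by_cases h : (z + w) ∈ S <;> simp [h]
  simp only [h]
  rw [PySem.List.sum_map_add_int]
  congr 1
  have h0 := PySem.List.sum_map_ite_one_zero (fun w => decide (z + w ∈ S)) l
  simp only [decide_eq_true_eq] at h0 ⊢
  rw [← h0]

-- the invariant of B's single pass: dict = counter of the processed prefix p, count c already accumulated
theorem pv_bfold (S : List Int) (l : List Int) :
    ∀ (p : List Int) (c : Int),
    (l.foldl (fun (st : PySem.Dict Int Int × Int) x =>
        (st.1.insert x (st.1.getD x 0 + 1),
         (PySem.Set.ofList S).foldl (fun c t => c + st.1.getD (t - x) 0) st.2))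
      (PySem.Dict.counter p, c)).2
      = c + pvCross S p l + pvSpec S l := by
  induction l with
  | nil => intro p c; simp [pvCross, pvSpec]
  | cons z l ih =>
    intro p c
    rw [List.foldl_cons]
    have hdict : (PySem.Dict.counter p).insert z ((PySem.Dict.counter p).getD z 0 + 1)
        = PySem.Dict.counter (p ++ [z]) := by
      rw [← PySem.Dict.foldl_insert_getD_add_one_eq_counter p,
          ← PySem.Dict.foldl_insert_getD_add_one_eq_counter (p ++ [z]), List.foldl_append]
      rfl
    rw [show ((PySem.Dict.counter p).insert z ((PySem.Dict.counter p).getD z 0 + 1),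
          (PySem.Set.ofList S).foldl (fun c t => c + (PySem.Dict.counter p).getD (t - z) 0) c)
        = (PySem.Dict.counter (p ++ [z]),
           c + (p.countP (fun y => decide (y + z ∈ S)) : Int)) by
      rw [hdict, PySem.List.foldl_add, pv_sum_targets]]
    rw [ih, pv_cross_append]
    simp only [pvSpec, pvCross, List.map_cons, List.sum_cons]
    ring

-- A's inner loop over j in range(i+1, n) counts the later elements y with v + y in S
theorem pv_inner (S a : List Int) (v : Int) :
    ∀ (k : Nat) (c : Int),
    (PySem.List.pyRange (k : Int) (a.length : Int) 1).foldl
      (fun c j => if (v + PySem.List.pyGetD a j 0) ∈ S then c + 1 else c) c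
      = c + (((a.drop k).countP (fun y => decide (v + y ∈ S))) : Int) := by
  intro k
  induction h : a.length - k generalizing k with
  | zero =>
    intro c
    have hge : a.length ≤ k := by omega
    rw [PySem.List.pyRange_one_eq_nil (by exact_mod_cast hge)]
    simp [List.drop_eq_nil_of_le hge]
  | succ m ih =>
    intro c
    have hlt : k < a.length := by omega
    rw [PySem.List.pyRange_one_cons (by exact_mod_cast hlt), List.foldl_cons]
    have hk1 : ((k : Int) + 1) = ((k + 1 : Nat) : Int) := by push_cast; ring
    rw [hk1, ih (k+1) (by omega)]
    rw [List.drop_eq_getElem_cons hlt, List.countP_cons]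
    rw [PySem.List.pyGetD_natCast, List.getD_eq_getElem a 0 hlt]
    by_cases hm : (v + a[k]) ∈ S <;> simp [hm] <;> ring

-- A's outer loop from index k accumulates the pair count of the suffix a.drop k
theorem pv_outer (S a : List Int) :
    ∀ (k : Nat) (c : Int),
    (PySem.List.pyRange (k : Int) (a.length : Int) 1).foldl (fun count i =>
      (PySem.List.pyRange (i + 1) (a.length : Int) 1).foldl (fun count j =>
        if (PySem.List.pyGetD a i 0 + PySem.List.pyGetD a j 0) ∈ S then count + 1 else count) count) c
      = c + pvSpec S (a.drop k) := by
  intro k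
  induction h : a.length - k generalizing k with
  | zero =>
    intro c
    have hge : a.length ≤ k := by omega
    rw [PySem.List.pyRange_one_eq_nil (by exact_mod_cast hge)]
    simp [List.drop_eq_nil_of_le hge, pvSpec]
  | succ m ih =>
    intro c
    have hlt : k < a.length := by omega
    rw [PySem.List.pyRange_one_cons (by exact_mod_cast hlt), List.foldl_cons]
    have hk1 : ((k : Int) + 1) = ((k + 1 : Nat) : Int) := by push_cast; ring
    rw [hk1, pv_inner S a _ (k+1), ih (k+1) (by omega)]
    rw [List.drop_eq_getElem_cons hlt]
    rw [show pvSpec S (a[k] :: a.drop (k+1))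
        = ((a.drop (k+1)).countP (fun y => decide (a[k] + y ∈ S)) : Int) + pvSpec S (a.drop (k+1)) from rfl]
    rw [PySem.List.pyGetD_natCast, List.getD_eq_getElem a 0 hlt]
    ring

theorem pv_A_eq_spec (a S : List Int) : count_perfect_pairs a S = pvSpec S a := by
  unfold count_perfect_pairs
  have h := pv_outer S a 0 0
  simpa using h

theorem pv_B_eq_spec (a S : List Int) : count_perfect_pairs_alt a S = pvSpec S a := by
  unfold count_perfect_pairs_alt
  have h := pv_bfold S a [] 0
  rw [show PySem.Dict.counter ([] : List Int) = (PySem.Dict.empty : PySem.Dict Int Int) from rfl] at h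
  rw [h]
  simp [pvCross]

-- ===== VERDICT (by name: the statement is the Claim_ definition above) =====
theorem count_perfect_pairs_spec : Claim_equal_count_perfect_pairs := by
  intro a S _
  unfold Spec_count_perfect_pairs
  rw [pv_A_eq_spec, pv_B_eq_spec]
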